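-- pv_equiv track=rewrite | github.com/set-kaung/DSA | old/reservation/reserve.py | can_insert_reservation
-- ===== SOURCE A (Python) =====
-- def can_insert_reservation(scheduled_reservations, required_interval, new_reservation):
--     # Add the new reservation to the list
--     scheduled_reservations.append(new_reservation)
--
--     # Perform an insertion sort to place the new reservation in the correct position
--     for i in range(1, len(scheduled_reservations)):
--         key = scheduled_reservations[i]
--         j = i - 1
--         while j >= 0 and scheduled_reservations[j] > key:
--             scheduled_reservations[j + 1] = scheduled_reservations[j]
--             j -= 1
--         scheduled_reservations[j + 1] = key
--
--     # Check if the new reservation violates the required time interval constraint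
--     for i in range(1, len(scheduled_reservations)):
--         if scheduled_reservations[i] - scheduled_reservations[i - 1] < required_interval:
--             return False
--
--     return True
-- ===== SOURCE B (Python) =====
-- def can_insert_reservation(scheduled_reservations, required_interval, new_reservation):
--     # Same in-place mutation as A: the list ends up sorted with the new element added.
--     scheduled_reservations.append(new_reservation)
--     scheduled_reservations.sort()
--     return all(b - a >= required_interval
--                for a, b in zip(scheduled_reservations, scheduled_reservations[1:]))
-- ===== Notes on version B (the rewrite author's own statement) =====
-- stated objective: faster
-- what changed: Replaces the hand-written O(n^2) index-shifting insertion sort plus early-return index loop by the built-in sort and a single zip-adjacent all() scan.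
import Mathlib
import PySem

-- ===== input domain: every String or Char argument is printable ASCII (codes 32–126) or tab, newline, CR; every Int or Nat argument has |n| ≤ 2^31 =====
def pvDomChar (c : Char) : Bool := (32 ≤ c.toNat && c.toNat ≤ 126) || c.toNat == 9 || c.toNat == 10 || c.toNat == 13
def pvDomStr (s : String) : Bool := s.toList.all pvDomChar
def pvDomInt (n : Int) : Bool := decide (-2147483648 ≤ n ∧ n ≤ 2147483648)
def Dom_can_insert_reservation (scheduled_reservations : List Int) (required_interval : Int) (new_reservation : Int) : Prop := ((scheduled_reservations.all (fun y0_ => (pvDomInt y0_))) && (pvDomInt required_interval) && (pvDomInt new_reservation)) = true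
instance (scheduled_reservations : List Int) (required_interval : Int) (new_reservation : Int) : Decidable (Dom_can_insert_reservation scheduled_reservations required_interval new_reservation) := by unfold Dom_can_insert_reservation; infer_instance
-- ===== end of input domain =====

-- B replaces A's hand-written index-shifting insertion sort and early-return gap loop
-- by the built-in sort plus one zip-adjacent all() scan (faster, O(n log n) vs O(n^2)).
-- Both A and B mutate the argument list identically (append then sort in place);
-- the equivalence proved here is about the return value.

-- ===== PORT A =====
-- inner while loop: argument jp1 encodes Python's j+1 (loop runs while j >= 0, i.e. jp1 > 0)
def pvShiftA (key : Int) : List Int → Nat → List Int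
  | xs, 0 => xs.set 0 key
  | xs, j + 1 =>
    if xs.getD j 0 > key then pvShiftA key (xs.set (j + 1) (xs.getD j 0)) j
    else xs.set (j + 1) key

-- outer for loop of the insertion sort, i over range(1, len(xs))
def pvSortA (xs : List Int) : List Int :=
  (List.range' 1 (xs.length - 1)).foldl (fun acc i => pvShiftA (acc.getD i 0) acc i) xs

-- gap-check for loop with early return False
def pvCheckA (xs : List Int) (ri : Int) : List Nat → Bool
  | [] => true
  | i :: rest => if xs.getD i 0 - xs.getD (i - 1) 0 < ri then false else pvCheckA xs ri rest

def can_insert_reservation (scheduled_reservations : List Int) (required_interval : Int) (new_reservation : Int) : Bool :=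
  let xs := pvSortA (scheduled_reservations ++ [new_reservation])
  pvCheckA xs required_interval (List.range' 1 (xs.length - 1))

-- ===== PORT B =====
def can_insert_reservation_alt (scheduled_reservations : List Int) (required_interval : Int) (new_reservation : Int) : Bool :=
  let xs := PySem.List.sorted (scheduled_reservations ++ [new_reservation]) (fun x => x) false
  (xs.zip xs.tail).all (fun p => decide (p.2 - p.1 ≥ required_interval))

-- ===== PRECONDITION & SPEC =====
def Spec_can_insert_reservation (scheduled_reservations : List Int) (required_interval : Int) (new_reservation : Int) (out : Bool) : Prop := out = can_insert_reservation_alt scheduled_reservations required_interval new_reservation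
instance (scheduled_reservations : List Int) (required_interval : Int) (new_reservation : Int) (out : Bool) : Decidable (Spec_can_insert_reservation scheduled_reservations required_interval new_reservation out) := by unfold Spec_can_insert_reservation; infer_instance

-- ===== CLAIM (what is proved, stated in full; the proofs are below) =====
def Claim_equal_can_insert_reservation : Prop := ∀ (scheduled_reservations : List Int) (required_interval : Int) (new_reservation : Int), Dom_can_insert_reservation scheduled_reservations required_interval new_reservation → Spec_can_insert_reservation scheduled_reservations required_interval new_reservation (can_insert_reservation scheduled_reservations required_interval new_reservation)

-- ===== LEMMAS AND PROOFS =====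

-- functional view of the inner while loop: insert key into a sorted prefix
def pvIns (key : Int) : List Int → List Int
  | [] => [key]
  | x :: t => if x ≤ key then x :: pvIns key t else key :: x :: t

theorem pvIns_append_gt (key a : Int) (l : List Int) (h : a > key) :
    pvIns key (l ++ [a]) = pvIns key l ++ [a] := by
  induction l with
  | nil => simp [pvIns, not_le.mpr h]
  | cons x t ih => by_cases hx : x ≤ key <;> simp [pvIns, hx, ih]

theorem pvIns_all_le (key : Int) (l : List Int) (h : ∀ x ∈ l, x ≤ key) :
    pvIns key l = l ++ [key] := by
  induction l with
  | nil => rfl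
  | cons x t ih =>
    simp only [pvIns, if_pos (h x (by simp))]
    rw [ih (fun y hy => h y (by simp [hy]))]; rfl

theorem pvIns_perm (key : Int) (l : List Int) : (pvIns key l).Perm (key :: l) := by
  induction l with
  | nil => rfl
  | cons x t ih =>
    by_cases hx : x ≤ key
    · simpa [pvIns, hx] using ((ih.cons x).trans (List.Perm.swap key x t))
    · simp [pvIns, hx]

theorem pvIns_length (key : Int) (l : List Int) : (pvIns key l).length = l.length + 1 := by
  simpa using (pvIns_perm key l).length_eq

theorem pvIns_pairwise (key : Int) (l : List Int) (h : l.Pairwise (· ≤ ·)) :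
    (pvIns key l).Pairwise (· ≤ ·) := by
  induction l with
  | nil => simp [pvIns]
  | cons x t ih =>
    rcases List.pairwise_cons.mp h with ⟨hx, ht⟩
    by_cases hxk : x ≤ key
    · simp only [pvIns, if_pos hxk]
      refine List.pairwise_cons.mpr ⟨?_, ih ht⟩
      intro y hy
      rcases List.mem_cons.mp ((pvIns_perm key t).mem_iff.mp hy) with rfl | h2
      · exact hxk
      · exact hx y h2
    · simp only [pvIns, if_neg hxk]
      refine List.pairwise_cons.mpr ⟨?_, h⟩
      intro y hy
      rcases List.mem_cons.mp hy with rfl | hyt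
      · exact le_of_not_ge fun hk => hxk (le_of_lt (lt_of_not_ge (by omega)))
      · exact le_trans (le_of_not_ge fun hk => hxk (by omega)) (hx y hyt)

theorem set_append_cons (l : List Int) (x v : Int) (r : List Int) :
    (l ++ x :: r).set l.length v = l ++ v :: r := by
  induction l with
  | nil => rfl
  | cons a t ih => simp [ih]

theorem getD_append_cons (l : List Int) (x : Int) (r : List Int) :
    (l ++ x :: r).getD l.length 0 = x := by
  induction l with
  | nil => rfl
  | cons a t ih => simpa using ih

-- the inner while loop, started at j = l.length - 1 with the key's slot at position l.length,
-- inserts key into the sorted prefix l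
theorem pvShiftA_spec (key : Int) (l : List Int) (x : Int) (r : List Int)
    (h : l.Pairwise (· ≤ ·)) :
    pvShiftA key (l ++ x :: r) l.length = pvIns key l ++ r := by
  induction l using List.reverseRecOn generalizing x r with
  | nil => simp [pvShiftA, pvIns]
  | append_singleton l' a ih =>
    have hlen : (l' ++ [a]).length = l'.length + 1 := by simp
    have hget : (l' ++ [a] ++ x :: r).getD l'.length 0 = a := by
      simpa using getD_append_cons l' a ([x] ++ r)
    have hl' : l'.Pairwise (· ≤ ·) := (List.pairwise_append.mp h).1
    rw [hlen]
    by_cases ha : a > key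
    · have hset : (l' ++ [a] ++ x :: r).set (l'.length + 1) a = l' ++ [a] ++ a :: r := by
        have := set_append_cons (l' ++ [a]) x a r
        simpa using this
      simp only [pvShiftA, hget, if_pos ha, hset]
      have hih := ih a (a :: r) hl'
      rw [pvIns_append_gt key a l' ha]
      simpa using hih
    · have hset : (l' ++ [a] ++ x :: r).set (l'.length + 1) key = l' ++ [a] ++ key :: r := by
        have := set_append_cons (l' ++ [a]) x key r
        simpa using this
      simp only [pvShiftA, hget, if_neg ha, hset]
      have hall : ∀ y ∈ l' ++ [a], y ≤ key := by
        intro y hy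
        rcases List.mem_append.mp hy with hy' | hy'
        · have := (List.pairwise_append.mp h).2.2 y hy' a (by simp)
          omega
        · simp at hy'; omega
      rw [pvIns_all_le key (l' ++ [a]) hall]; simp

-- functional insertion sort
def pvIsort (p : List Int) (r : List Int) : List Int := r.foldl (fun acc x => pvIns x acc) p

theorem pvSortA_loop (r : List Int) (p : List Int) (h : p.Pairwise (· ≤ ·)) :
    (List.range' p.length r.length).foldl (fun acc i => pvShiftA (acc.getD i 0) acc i) (p ++ r)
      = pvIsort p r := by
  induction r generalizing p with
  | nil => simp [pvIsort]
  | cons x r' ih =>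
    rw [List.length_cons, List.range'_succ, List.foldl_cons]
    rw [getD_append_cons p x r', pvShiftA_spec x p x r' h]
    have hlen : (pvIns x p).length = p.length + 1 := pvIns_length x p
    have := ih (pvIns x p) (pvIns_pairwise x p h)
    rw [hlen] at this
    simpa [pvIsort] using this

theorem pvIsort_perm (r p : List Int) : (pvIsort p r).Perm (p ++ r) := by
  induction r generalizing p with
  | nil => simp [pvIsort]
  | cons x r' ih =>
    have h1 : (pvIsort (pvIns x p) r').Perm (pvIns x p ++ r') := ih (pvIns x p)
    have h2 : (pvIns x p ++ r').Perm (x :: (p ++ r')) := by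
      simpa using (pvIns_perm x p).append_right r'
    have h3 : (x :: (p ++ r')).Perm (p ++ x :: r') := List.perm_middle.symm
    exact (h1.trans h2).trans h3

theorem pvIsort_pairwise (r p : List Int) (h : p.Pairwise (· ≤ ·)) :
    (pvIsort p r).Pairwise (· ≤ ·) := by
  induction r generalizing p with
  | nil => simpa [pvIsort] using h
  | cons x r' ih => exact ih (pvIns x p) (pvIns_pairwise x p h)

theorem pvSortA_eq_sorted (h : Int) (t : List Int) :
    pvSortA (h :: t) = PySem.List.sorted (h :: t) (fun x => x) false := by
  have hloop := pvSortA_loop t [h] (by simp)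
  have hA : pvSortA (h :: t) = pvIsort [h] t := by
    simpa [pvSortA] using hloop
  rw [hA]
  have hperm : (pvIsort [h] t).Perm (h :: t) := by simpa using pvIsort_perm t [h]
  exact (PySem.List.sorted_id_eq_of_perm_of_pairwise (h :: t) (pvIsort [h] t) hperm
    (pvIsort_pairwise t [h] (by simp))).symm

theorem pvCheckA_shift (ri : Int) (a : Int) (xs : List Int) (m s : Nat) :
    pvCheckA (a :: xs) ri (List.range' (s + 2) m) = pvCheckA xs ri (List.range' (s + 1) m) := by
  induction m generalizing s with
  | zero => rfl
  | succ m ih =>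
    rw [List.range'_succ, List.range'_succ]
    simp only [pvCheckA]
    have h1 : (a :: xs).getD (s + 2) 0 = xs.getD (s + 1) 0 := rfl
    have h2 : (a :: xs).getD (s + 2 - 1) 0 = xs.getD (s + 1 - 1) 0 := rfl
    rw [h1, h2]
    split_ifs with hc
    · rfl
    · exact ih (s + 1)

theorem check_eq_all (xs : List Int) (ri : Int) :
    pvCheckA xs ri (List.range' 1 (xs.length - 1))
      = (xs.zip xs.tail).all (fun p => decide (p.2 - p.1 ≥ ri)) := by
  induction xs with
  | nil => rfl
  | cons a t ih =>
    cases t with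
    | nil => rfl
    | cons b t' =>
      have hlen : (a :: b :: t').length - 1 = t'.length + 1 := by simp
      rw [hlen, List.range'_succ]
      simp only [pvCheckA]
      have hg : (a :: b :: t').getD 1 0 - (a :: b :: t').getD 0 0 = b - a := rfl
      rw [hg]
      have hshift : pvCheckA (a :: b :: t') ri (List.range' 2 t'.length)
          = pvCheckA (b :: t') ri (List.range' 1 t'.length) :=
        pvCheckA_shift ri a (b :: t') t'.length 0
      have hlen2 : (b :: t').length - 1 = t'.length := by simp
      have ihh := ih
      rw [hlen2] at ihh
      by_cases hc : b - a < ri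
      · simp [hc, List.zip, List.all_cons, show ¬ (b - a ≥ ri) by omega]
      · simp only [if_neg hc, hshift, ihh]
        simp [List.all_cons, show b - a ≥ ri by omega]

-- ===== VERDICT (by name: the statement is the Claim_ definition above) =====
theorem can_insert_reservation_spec : Claim_equal_can_insert_reservation := by
  intro srs ri nr _
  unfold Spec_can_insert_reservation can_insert_reservation can_insert_reservation_alt
  obtain ⟨h, t, hht⟩ : ∃ h t, srs ++ [nr] = h :: t := by
    cases hx : srs ++ [nr] with
    | nil => exact absurd hx (by simp)
    | cons h t => exact ⟨h, t, rfl⟩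
  simp only [hht, pvSortA_eq_sorted, check_eq_all]
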